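-- pv_equiv track=rewrite | github.com/mokoconsulting-tech/MokoStandards | scripts/maintenance/add_dry_run_support.py | find_argparse_location
-- ===== SOURCE A (Python) =====
-- def find_argparse_location(content):
--     """Find where to add --dry-run argument."""
--     lines = content.split('\n')
--
--     # Find the ArgumentParser setup
--     parser_line = None
--     last_add_argument = None
--
--     for i, line in enumerate(lines):
--         if 'ArgumentParser' in line:
--             parser_line = i
--         if 'parser.add_argument' in line or 'add_argument' in line:
--             last_add_argument = i
--
--     return last_add_argument if last_add_argument else parser_line
-- ===== SOURCE B (Python) =====
-- def find_argparse_location(content):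
--     """Find where to add --dry-run argument."""
--     lines = content.split('\n')
--     last_add = next((i for i in range(len(lines) - 1, -1, -1)
--                      if 'add_argument' in lines[i]), None)
--     parser_line = next((i for i in range(len(lines) - 1, -1, -1)
--                         if 'ArgumentParser' in lines[i]), None)
--     return last_add if last_add else parser_line
-- ===== Notes on version B (the rewrite author's own statement) =====
-- stated objective: alternative
-- what changed: Replaces A's single forward pass that keeps overwriting two last-seen indices with two independent backward scans that each early-exit at the first (i.e. last) matching line, and drops A's redundant longer membership test, which is subsumed by the shorter one.
import Mathlib
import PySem

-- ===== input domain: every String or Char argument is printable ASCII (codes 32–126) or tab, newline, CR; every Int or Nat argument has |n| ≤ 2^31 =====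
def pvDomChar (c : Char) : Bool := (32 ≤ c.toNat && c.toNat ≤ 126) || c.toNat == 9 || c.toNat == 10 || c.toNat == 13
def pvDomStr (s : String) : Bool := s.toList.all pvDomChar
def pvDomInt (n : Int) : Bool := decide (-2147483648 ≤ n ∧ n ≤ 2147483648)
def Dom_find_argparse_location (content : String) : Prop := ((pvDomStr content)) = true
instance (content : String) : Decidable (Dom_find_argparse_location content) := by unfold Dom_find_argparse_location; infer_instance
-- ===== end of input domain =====

-- B replaces A's forward overwrite-loop with two backward early-exit scans; same result (alternative decomposition, not faster).

-- ===== PORT A =====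
-- for i, line in enumerate(lines): overwrite parser_line / last_add_argument on match
def find_argparse_location (content : String) : Option Int :=
  let lines := (PySem.Str.split? content "\n").getD []  -- sep "\n" ≠ "", so split? is always some
  let st := (PySem.List.enumerate lines).foldl
    (fun (st : Option Int × Option Int) (p : Int × String) =>
      let st1 := if PySem.Str.isIn "ArgumentParser" p.2 then (some p.1, st.2) else st
      if PySem.Str.isIn "parser.add_argument" p.2 || PySem.Str.isIn "add_argument" p.2
        then (st1.1, some p.1) else st1)
    (none, none)
  -- 'last_add_argument if last_add_argument else parser_line' (0 is falsy)
  match st.2 with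
  | some i => if i ≠ 0 then some i else st.1
  | none => st.1

-- ===== PORT B =====
-- next((i for i in range(len(lines)-1, -1, -1) if sub in lines[i]), None): check index k-1, then recurse downward
def revFind (sub : String) (lines : List String) : Nat → Option Int
  | 0 => none
  | k + 1 => if PySem.Str.isIn sub (lines.getD k "") then some (k : Int) else revFind sub lines k

def find_argparse_location_alt (content : String) : Option Int :=
  let lines := (PySem.Str.split? content "\n").getD []  -- sep "\n" ≠ "", so split? is always some
  let lastAdd := revFind "add_argument" lines lines.length
  let parserLine := revFind "ArgumentParser" lines lines.length
  match lastAdd with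
  | some i => if i ≠ 0 then some i else parserLine
  | none => parserLine

-- ===== PRECONDITION & SPEC =====
def Spec_find_argparse_location (content : String) (out : Option Int) : Prop := out = find_argparse_location_alt content
instance (content : String) (out : Option Int) : Decidable (Spec_find_argparse_location content out) := by unfold Spec_find_argparse_location; infer_instance

-- ===== CLAIM (what is proved, stated in full; the proofs are below) =====
def Claim_equal_find_argparse_location : Prop := ∀ (content : String), Dom_find_argparse_location content → Spec_find_argparse_location content (find_argparse_location content)

-- ===== LEMMAS AND PROOFS =====

-- forward "keep overwriting" fold for one predicate
def fwdLast (p : String → Bool) (lines : List String) : Option Int :=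
  (PySem.List.enumerate lines).foldl (fun acc q => if p q.2 then some q.1 else acc) none

def revFindP (p : String → Bool) (lines : List String) : Nat → Option Int
  | 0 => none
  | k + 1 => if p (lines.getD k "") then some (k : Int) else revFindP p lines k

theorem revFind_eq_revFindP (sub : String) (lines : List String) (k : Nat) :
    revFind sub lines k = revFindP (fun l => PySem.Str.isIn sub l) lines k := by
  induction k with
  | zero => rfl
  | succ k ih => simp only [revFind, revFindP, ih]

theorem revFindP_append (p : String → Bool) (l : List String) (x : String) (k : Nat)
    (hk : k ≤ l.length) : revFindP p (l ++ [x]) k = revFindP p l k := by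
  induction k with
  | zero => rfl
  | succ k ih =>
    have hklt : k < l.length := hk
    simp [revFindP, List.getD, List.getElem?_append_left hklt, ih (Nat.le_of_lt hklt)]

theorem fwdLast_eq_revFindP (p : String → Bool) (lines : List String) :
    fwdLast p lines = revFindP p lines lines.length := by
  induction lines using List.reverseRecOn with
  | nil => rfl
  | append_singleton l x ih =>
    unfold fwdLast at *
    rw [PySem.List.enumerate_append]
    simp only [List.foldl_append, PySem.List.enumerate, List.foldl_cons, List.foldl_nil]
    rw [List.length_append, List.length_singleton]
    simp only [revFindP, List.getD, List.getElem?_append_right (Nat.le_refl l.length),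
      Nat.sub_self, List.getElem?_cons_zero, Option.getD_some]
    by_cases hp : p x
    · simp [hp]
    · simp [hp, revFindP_append p l x l.length (Nat.le_refl _), ih]

-- the pair fold of port A splits into two independent single-option folds
theorem foldPair_split (p q : String → Bool) (L : List (Int × String)) (s1 s2 : Option Int) :
    L.foldl
      (fun (st : Option Int × Option Int) (r : Int × String) =>
        let st1 := if p r.2 then (some r.1, st.2) else st
        if q r.2 then (st1.1, some r.1) else st1)
      (s1, s2)
    = (L.foldl (fun acc r => if p r.2 then some r.1 else acc) s1,
       L.foldl (fun acc r => if q r.2 then some r.1 else acc) s2) := by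
  induction L generalizing s1 s2 with
  | nil => rfl
  | cons r L ih =>
    simp only [List.foldl_cons]
    by_cases h1 : p r.2 <;> by_cases h2 : q r.2 <;> simp [h1, h2, ih]

-- 'parser.add_argument' in line implies 'add_argument' in line, so the disjunction collapses
theorem isIn_padd_imp (x : String) :
    (PySem.Str.isIn "parser.add_argument" x || PySem.Str.isIn "add_argument" x)
      = PySem.Str.isIn "add_argument" x := by
  cases h2 : PySem.Str.isIn "add_argument" x with
  | true => rw [Bool.or_true]
  | false =>
    have h1 : PySem.Str.isIn "parser.add_argument" x = false := by
      rw [PySem.Str.isIn_eq] at h2 ⊢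
      rw [PySem.Chars.isIn_eq_false_iff] at h2 ⊢
      intro hinf
      exact h2 (List.IsInfix.trans (by decide) hinf)
    rw [h1, Bool.false_or]

-- ===== VERDICT (by name: the statement is the Claim_ definition above) =====
theorem find_argparse_location_spec : Claim_equal_find_argparse_location := by
  intro content _
  show find_argparse_location content = find_argparse_location_alt content
  simp only [find_argparse_location, find_argparse_location_alt]
  rw [foldPair_split (fun l => PySem.Str.isIn "ArgumentParser" l)
        (fun l => PySem.Str.isIn "parser.add_argument" l || PySem.Str.isIn "add_argument" l)]
  have hfun : (fun (acc : Option Int) (r : Int × String) =>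
        if PySem.Str.isIn "parser.add_argument" r.2 || PySem.Str.isIn "add_argument" r.2
          then some r.1 else acc)
      = (fun (acc : Option Int) (r : Int × String) =>
        if PySem.Str.isIn "add_argument" r.2 then some r.1 else acc) := by
    funext acc r
    rw [isIn_padd_imp]
  rw [hfun]
  rw [show ∀ lines : List String,
        (PySem.List.enumerate lines).foldl
          (fun (acc : Option Int) (r : Int × String) =>
            if PySem.Str.isIn "add_argument" r.2 then some r.1 else acc) none
        = fwdLast (fun l => PySem.Str.isIn "add_argument" l) lines from fun _ => rfl,
      show ∀ lines : List String,
        (PySem.List.enumerate lines).foldl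
          (fun (acc : Option Int) (r : Int × String) =>
            if PySem.Str.isIn "ArgumentParser" r.2 then some r.1 else acc) none
        = fwdLast (fun l => PySem.Str.isIn "ArgumentParser" l) lines from fun _ => rfl]
  rw [fwdLast_eq_revFindP, fwdLast_eq_revFindP, ← revFind_eq_revFindP, ← revFind_eq_revFindP]
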